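-- pv_equiv track=rewrite | github.com/AnanthSrinivasan/finviz-screener-agent | agents/market/market_monitor.py | _build_cycle_chain
-- ===== SOURCE A (Python) =====
-- def _build_cycle_chain(history: list) -> str:
--     """Build a deduplicated state progression string from history.
--     e.g. RED › THRUST › GREEN › *THRUST*  (current state bolded)
--     """
--     # Deduplicate consecutive identical states
--     chain = []
--     for entry in history:
--         s = entry.get("market_state", "")
--         if not s:
--             continue
--         if not chain or chain[-1] != s:
--             chain.append(s)
--     # Keep last 5 distinct states for readability
--     chain = chain[-5:]
--     if not chain:
--         return ""
--     parts = [f"*{s}*" if i == len(chain) - 1 else s for i, s in enumerate(chain)]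
--     return "Cycle: " + " › ".join(parts)
-- ===== SOURCE B (Python) =====
-- def _build_cycle_chain(history: list) -> str:
--     """Build a deduplicated state progression string from history.
--
--     Walks the history backwards, collecting at most 5 consecutive-distinct
--     non-empty states, then reverses and formats.
--     """
--     collected = []
--     last = None
--     for entry in reversed(history):
--         s = entry.get("market_state", "")
--         if not s:
--             continue
--         if s != last:
--             collected.append(s)
--             last = s
--             if len(collected) == 5:
--                 break
--     if not collected:
--         return ""
--     chain = collected[::-1]
--     parts = chain[:-1] + ["*" + chain[-1] + "*"]
--     return "Cycle: " + " › ".join(parts)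
-- ===== Notes on version B (the rewrite author's own statement) =====
-- stated objective: alternative
-- what changed: B replaces A's full forward consecutive-dedup pass plus a [-5:] slice with a single backward walk that collects at most 5 consecutive-distinct states and stops early, then reverses and formats the tail directly instead of A's enumerate-and-compare-index pass.
import Mathlib
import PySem

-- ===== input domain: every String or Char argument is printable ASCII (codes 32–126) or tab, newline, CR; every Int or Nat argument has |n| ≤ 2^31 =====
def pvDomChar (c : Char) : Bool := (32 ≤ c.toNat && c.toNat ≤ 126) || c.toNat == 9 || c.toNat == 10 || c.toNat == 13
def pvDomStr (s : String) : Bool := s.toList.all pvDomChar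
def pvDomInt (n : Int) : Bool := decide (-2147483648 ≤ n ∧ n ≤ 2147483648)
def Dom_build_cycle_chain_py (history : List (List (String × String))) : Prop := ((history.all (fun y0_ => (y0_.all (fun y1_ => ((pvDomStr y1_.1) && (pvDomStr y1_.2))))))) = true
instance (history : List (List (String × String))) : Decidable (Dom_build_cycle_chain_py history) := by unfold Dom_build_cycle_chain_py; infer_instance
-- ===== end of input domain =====

-- B walks the history in reverse, collecting at most 5 consecutive-distinct states with an
-- early stop, instead of A's full forward dedup pass followed by a [-5:] slice
-- (objective: alternative decomposition; same observable behaviour).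

-- entry.get("market_state", "") : first-match lookup in the association list (both ports)
def pvState (e : List (String × String)) : String := (List.lookup "market_state" e).getD ""

-- ===== PORT A =====
def build_cycle_chain_py (history : List (List (String × String))) : String :=
  let chain := history.foldl (fun chain entry =>
    let s := pvState entry
    if s = "" then chain
    else if chain = [] ∨ (PySem.List.pyGet? chain (-1)).getD "" ≠ s then chain ++ [s]
    else chain) []
  let chain2 := PySem.List.slice chain (some (-5)) none
  if chain2 = [] then ""
  else
    let parts := (PySem.List.enumerate chain2).map
      (fun p => if p.1 = (chain2.length : Int) - 1 then "*" ++ p.2 ++ "*" else p.2)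
    "Cycle: " ++ PySem.Str.join " › " parts

-- ===== PORT B =====
-- the reversed loop of Source B, with its early break at 5 collected states
def pvCollect : List (List (String × String)) → Option String → List String → List String
  | [], _, acc => acc
  | e :: rest, last, acc =>
    let s := pvState e
    if s = "" then pvCollect rest last acc
    else if some s ≠ last then
      let acc' := acc ++ [s]
      if acc'.length = 5 then acc' else pvCollect rest (some s) acc'
    else pvCollect rest last acc

def build_cycle_chain_py_alt (history : List (List (String × String))) : String :=
  let collected := pvCollect history.reverse none []
  if collected = [] then ""
  else
    let chain := collected.reverse
    -- chain[-1] is in range here (chain is nonempty), so the .getD "" default is never used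
    let parts := chain.dropLast ++ ["*" ++ (PySem.List.pyGet? chain (-1)).getD "" ++ "*"]
    "Cycle: " ++ PySem.Str.join " › " parts

-- ===== PRECONDITION & SPEC =====
def Spec_build_cycle_chain_py (history : List (List (String × String))) (out : String) : Prop := out = build_cycle_chain_py_alt history
instance (history : List (List (String × String))) (out : String) : Decidable (Spec_build_cycle_chain_py history out) := by unfold Spec_build_cycle_chain_py; infer_instance

-- ===== CLAIM (what is proved, stated in full; the proofs are below) =====
def Claim_equal_build_cycle_chain_py : Prop := ∀ (history : List (List (String × String))), Dom_build_cycle_chain_py history → Spec_build_cycle_chain_py history (build_cycle_chain_py history)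

-- ===== LEMMAS AND PROOFS =====

-- A's loop body, named for the proofs (definitionally A's fold lambda)
def pvStepA (chain : List String) (entry : List (String × String)) : List String :=
  let s := pvState entry
  if s = "" then chain
  else if chain = [] ∨ (PySem.List.pyGet? chain (-1)).getD "" ≠ s then chain ++ [s]
  else chain

-- consecutive dedup with an optional "last kept" marker
def pvDed : Option String → List String → List String
  | _, [] => []
  | last, s :: rest => if some s = last then pvDed last rest else s :: pvDed (some s) rest

-- non-empty states of the history, in order
def pvStates (history : List (List (String × String))) : List String :=
  history.filterMap (fun e => if pvState e = "" then none else some (pvState e))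

theorem pvStates_nil : pvStates [] = [] := rfl

theorem pvStates_cons (e : List (String × String)) (rest : List (List (String × String))) :
    pvStates (e :: rest) =
      if pvState e = "" then pvStates rest else pvState e :: pvStates rest := by
  by_cases h : pvState e = "" <;> simp [pvStates, h]

theorem pvStates_reverse (history : List (List (String × String))) :
    pvStates history.reverse = (pvStates history).reverse := by
  simp [pvStates, List.filterMap_reverse]

theorem getLast?_cons_or (s : String) (t : List String) :
    (s :: t).getLast? = t.getLast?.or (some s) := by
  cases t with
  | nil => simp
  | cons b t' =>
    rw [List.getLast?_cons_cons]
    cases hgl : (b :: t').getLast? with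
    | none => simp [List.getLast?_eq_none_iff] at hgl
    | some y => simp

theorem pvDed_append (l : List String) :
    ∀ (m : List String) (last : Option String),
      pvDed last (l ++ m) = pvDed last l ++ pvDed (l.getLast?.or last) m := by
  induction l with
  | nil => intro m last; simp [pvDed]
  | cons s t ih =>
    intro m last
    rw [getLast?_cons_or, Option.or_assoc]
    by_cases h : some s = last
    · have hb : (some s).or last = last := by rw [h]; cases last <;> rfl
      rw [hb]
      simp only [List.cons_append, pvDed, if_pos h]
      exact ih m last
    · have hb : (some s).or last = some s := rfl
      rw [hb]
      simp only [List.cons_append, pvDed, if_neg h]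
      rw [ih m (some s)]

theorem pvDed_none_of_head_ne (a : String) (l : List String) (h : l.head? ≠ some a) :
    pvDed (some a) l = pvDed none l := by
  cases l with
  | nil => rfl
  | cons b t =>
    have hb : ¬ (some b = some a) := by simpa using h
    simp [pvDed, hb]

theorem pvDed_const (a : String) :
    ∀ (l : List String), (∀ x ∈ l, x = a) → pvDed (some a) l = [] := by
  intro l
  induction l with
  | nil => intro _; rfl
  | cons b t ih =>
    intro h
    have hb : some b = some a := by rw [h b (by simp)]
    simp only [pvDed, if_pos hb]
    exact ih (fun x hx => h x (by simp [hx]))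

theorem pvDed_run (a : String) (r : List String) (last : Option String)
    (h1 : ∀ x ∈ r, x = a) (h2 : some a ≠ last) :
    pvDed last (r ++ [a]) = [a] := by
  cases r with
  | nil => simp [pvDed, h2]
  | cons b r' =>
    have hb : b = a := h1 b (by simp)
    subst hb
    simp only [List.cons_append, pvDed, if_neg h2]
    congr 1
    apply pvDed_const
    intro x hx
    rcases List.mem_append.1 hx with h | h
    · exact h1 x (by simp [h])
    · simpa using h

theorem pvDed_reverse_aux :
    ∀ (n : Nat) (l : List String), l.length ≤ n →
      pvDed none l.reverse = (pvDed none l).reverse := by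
  intro n
  induction n with
  | zero =>
    intro l hl
    have : l = [] := List.eq_nil_of_length_eq_zero (Nat.le_zero.1 hl)
    subst this; rfl
  | succ n ih =>
    intro l hl
    cases l with
    | nil => rfl
    | cons a t =>
      have hsplit : t.takeWhile (fun x => x == a) ++ t.dropWhile (fun x => x == a) = t :=
        List.takeWhile_append_dropWhile
      set run := t.takeWhile (fun x => x == a) with hrun
      set t' := t.dropWhile (fun x => x == a) with ht'
      have hrunall : ∀ x ∈ run, x = a := by
        intro x hx
        have := List.mem_takeWhile_imp hx
        simpa using this
      have hkey : ∀ (tl : List String) (b : String),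
          (tl.dropWhile (fun x => x == a)).head? = some b → (b == a) = false := by
        intro tl
        induction tl with
        | nil => simp
        | cons c cs ih2 =>
          intro b hb
          rw [List.dropWhile_cons] at hb
          by_cases hc : (c == a) = true
          · rw [if_pos hc] at hb
            exact ih2 b hb
          · rw [if_neg hc] at hb
            simp only [List.head?_cons, Option.some.injEq] at hb
            subst hb
            simpa using hc
      have hhead : t'.head? ≠ some a := by
        cases h : t'.head? with
        | none => simp
        | some b =>
          have hba := hkey t b (by rw [← ht']; exact h)
          simp only [ne_eq, Option.some.injEq]
          intro hba2
          rw [hba2] at hba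
          simp at hba
      have ht'len : t'.length ≤ n := by
        have h1 : t'.length ≤ t.length := by
          rw [ht']; exact List.length_dropWhile_le _ _
        have h2 : (a :: t).length = t.length + 1 := rfl
        omega
      have ihh := ih t' ht'len
      have lhs : pvDed none (a :: t).reverse = (pvDed none t').reverse ++ [a] := by
        have hrw : (a :: t).reverse = t'.reverse ++ (run.reverse ++ [a]) := by
          rw [List.reverse_cons]
          conv_lhs => rw [← hsplit]
          rw [List.reverse_append, List.append_assoc]
        rw [hrw, pvDed_append]
        have hlast : t'.reverse.getLast?.or none = t'.head? := by
          rw [List.getLast?_reverse]; cases t'.head? <;> rfl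
        rw [hlast, ihh]
        congr 1
        exact pvDed_run a run.reverse t'.head?
          (fun x hx => hrunall x (List.mem_reverse.1 hx))
          (fun h => hhead h.symm)
      have hor : run.getLast?.or (some a) = some a := by
        cases h : run.getLast? with
        | none => rfl
        | some x =>
          have hx : x ∈ run := List.mem_of_getLast? h
          rw [hrunall x hx]; rfl
      have rhs : pvDed none (a :: t) = a :: pvDed none t' := by
        have h0 : pvDed none (a :: t) = a :: pvDed (some a) t := by
          simp [pvDed]
        rw [h0]
        conv_lhs => rw [← hsplit]
        rw [pvDed_append, pvDed_const a run hrunall, hor,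
          pvDed_none_of_head_ne a t' hhead, List.nil_append]
      rw [lhs, rhs, List.reverse_cons]

theorem pvDed_reverse (l : List String) :
    pvDed none l.reverse = (pvDed none l).reverse :=
  pvDed_reverse_aux l.length l (le_refl _)

-- A's forward fold builds acc ++ consecutive-dedup of the remaining states
theorem foldA_eq (entries : List (List (String × String))) :
    ∀ (acc : List String),
      entries.foldl pvStepA acc = acc ++ pvDed acc.getLast? (pvStates entries) := by
  induction entries with
  | nil => intro acc; simp [pvStates_nil, pvDed]
  | cons e rest ih =>
    intro acc
    rw [List.foldl_cons]
    by_cases hs : pvState e = ""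
    · have hstep : pvStepA acc e = acc := by simp [pvStepA, hs]
      rw [hstep, ih, pvStates_cons, if_pos hs]
    · cases hacc : acc.getLast? with
      | none =>
        have hnil : acc = [] := List.getLast?_eq_none_iff.1 hacc
        subst hnil
        have hstep : pvStepA [] e = [pvState e] := by simp [pvStepA, hs]
        rw [hstep, ih, pvStates_cons, if_neg hs]
        have h1 : ([pvState e] : List String).getLast? = some (pvState e) := rfl
        rw [h1]
        have h2 : ¬ (some (pvState e) = (none : Option String)) := by simp
        simp [pvDed]
      | some x =>
        have hget : (PySem.List.pyGet? acc (-1)).getD "" = x := by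
          rw [PySem.List.pyGet?_neg_one, hacc]; rfl
        have hne : acc ≠ [] := by
          intro h; rw [h] at hacc; simp at hacc
        by_cases hxs : x = pvState e
        · have hstep : pvStepA acc e = acc := by
            have hcond : ¬ (acc = [] ∨ (PySem.List.pyGet? acc (-1)).getD "" ≠ pvState e) := by
              rw [hget]; exact fun hor => hor.elim hne (fun hh => hh hxs)
            simp only [pvStepA, if_neg hs, if_neg hcond]
          rw [hstep, ih, pvStates_cons, if_neg hs]
          have heq : some (pvState e) = some x := by rw [hxs]
          simp [pvDed, heq, hacc]
        · have hstep : pvStepA acc e = acc ++ [pvState e] := by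
            have hcond : acc = [] ∨ (PySem.List.pyGet? acc (-1)).getD "" ≠ pvState e := by
              rw [hget]; exact Or.inr hxs
            simp only [pvStepA, if_neg hs, if_pos hcond]
          rw [hstep, ih, pvStates_cons, if_neg hs]
          have h1 : (acc ++ [pvState e]).getLast? = some (pvState e) := by simp
          rw [h1]
          have hne2 : ¬ (some (pvState e) = some x) := by
            intro h; exact hxs (by injection h with h; exact h.symm)
          simp [pvDed, hne2]

-- the same statement phrased with A's literal fold lambda (definitionally pvStepA)
theorem foldA_eq' (history : List (List (String × String))) (acc : List String) :
    history.foldl (fun chain entry =>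
      let s := pvState entry
      if s = "" then chain
      else if chain = [] ∨ (PySem.List.pyGet? chain (-1)).getD "" ≠ s then chain ++ [s]
      else chain) acc = acc ++ pvDed acc.getLast? (pvStates history) :=
  foldA_eq history acc

-- B's reversed loop with early break computes take 5 of the full dedup
theorem pvCollect_eq (entries : List (List (String × String))) :
    ∀ (last : Option String) (acc : List String), acc.length < 5 →
      pvCollect entries last acc = (acc ++ pvDed last (pvStates entries)).take 5 := by
  induction entries with
  | nil =>
    intro last acc h
    simp [pvCollect, pvStates_nil, pvDed, List.take_of_length_le (Nat.le_of_lt h)]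
  | cons e rest ih =>
    intro last acc h
    by_cases hs : pvState e = ""
    · have hstep : pvCollect (e :: rest) last acc = pvCollect rest last acc := by
        simp [pvCollect, hs]
      rw [hstep, ih last acc h, pvStates_cons, if_pos hs]
    · by_cases heq : some (pvState e) = last
      · have hstep : pvCollect (e :: rest) last acc = pvCollect rest last acc := by
          simp [pvCollect, hs, heq]
        rw [hstep, ih last acc h, pvStates_cons, if_neg hs]
        simp [pvDed, heq]
      · have hrw : pvCollect (e :: rest) last acc =
            (if (acc ++ [pvState e]).length = 5 then acc ++ [pvState e]
             else pvCollect rest (some (pvState e)) (acc ++ [pvState e])) := by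
          simp [pvCollect, hs, heq]
        rw [hrw, pvStates_cons, if_neg hs]
        simp only [pvDed, if_neg heq]
        have hassoc : acc ++ pvState e :: pvDed (some (pvState e)) (pvStates rest)
            = (acc ++ [pvState e]) ++ pvDed (some (pvState e)) (pvStates rest) := by
          simp
        rw [hassoc]
        by_cases h5 : (acc ++ [pvState e]).length = 5
        · rw [if_pos h5, List.take_append_of_le_length (by omega),
            List.take_of_length_le (by omega)]
        · have hlen : (acc ++ [pvState e]).length < 5 := by
            simp at h5 ⊢; omega
          rw [if_neg h5, ih (some (pvState e)) (acc ++ [pvState e]) hlen]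

-- A's enumerate-map formatting equals B's dropLast ++ starred-last, on nonempty chains
theorem parts_eq (chain : List String) (h : chain ≠ []) :
    (PySem.List.enumerate chain).map
      (fun p => if p.1 = (chain.length : Int) - 1 then "*" ++ p.2 ++ "*" else p.2)
    = chain.dropLast ++ ["*" ++ (PySem.List.pyGet? chain (-1)).getD "" ++ "*"] := by
  rcases (List.eq_nil_or_concat chain).resolve_left h with ⟨xs, x, rfl⟩
  simp only [List.concat_eq_append]
  rw [PySem.List.pyGet?_neg_one_append_singleton]
  have hlen : ((xs ++ [x]).length : Int) - 1 = (xs.length : Int) := by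
    simp
  rw [hlen, PySem.List.enumerate_append, List.map_append]
  have h1 : (PySem.List.enumerate xs).map
      (fun p => if p.1 = (xs.length : Int) then "*" ++ p.2 ++ "*" else p.2)
      = (PySem.List.enumerate xs).map (fun p => p.2) := by
    apply List.map_congr_left
    intro p hp
    rcases (PySem.List.mem_enumerate_iff _ _ _).1 hp with ⟨k, hk, rfl⟩
    have hkne : ¬ (k = xs.length) := by omega
    simp [hkne]
  rw [h1, PySem.List.map_snd_enumerate]
  have h2 : PySem.List.enumerate [x] (0 + (xs.length : Int)) = [((xs.length : Int), x)] := by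
    rw [PySem.List.enumerate_cons, PySem.List.enumerate_nil]
    norm_num
  rw [show PySem.List.enumerate [x] ((0 : Int) + (xs.length : Int)) = [((xs.length : Int), x)] from h2]
  simp

-- ===== VERDICT (by name: the statement is the Claim_ definition above) =====
theorem build_cycle_chain_py_spec : Claim_equal_build_cycle_chain_py := by
  unfold Claim_equal_build_cycle_chain_py
  intro history _
  unfold Spec_build_cycle_chain_py build_cycle_chain_py build_cycle_chain_py_alt
  simp only [foldA_eq', List.getLast?_nil, List.nil_append]
  set D := pvDed none (pvStates history) with hD
  rw [PySem.List.slice_from_neg_ofNat D 5 (by norm_num)]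
  rw [pvCollect_eq history.reverse none [] (by simp), pvStates_reverse, pvDed_reverse, ← hD,
    List.nil_append]
  have hcoll : (D.reverse.take 5).reverse = D.drop (D.length - 5) := by
    rw [List.take_reverse, List.reverse_reverse]
  have hnil : D.reverse.take 5 = [] ↔ D.drop (D.length - 5) = [] := by
    constructor
    · intro hh
      have := congrArg List.reverse hh
      rw [hcoll] at this; simpa using this
    · intro hh
      have : (D.reverse.take 5).reverse = [] := by rw [hcoll, hh]
      simpa using this
  by_cases hcase : D.drop (D.length - 5) = []
  · rw [if_pos hcase, if_pos (hnil.2 hcase)]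
  · rw [if_neg hcase, if_neg (fun hh => hcase (hnil.1 hh)), hcoll, parts_eq _ hcase]
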